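-- pv_equiv track=rewrite | github.com/kaist-cs453-2019s-team7/cotegen | examples/references/strings/282A.py | solve
-- ===== SOURCE A (Python) =====
-- from typing import List
--
-- def solve(lines: List[str]):
--   X = 0
--   for line in lines:
--     if line == "X++" or line == "X--":
--       X += 1
--     else:
--       X -= 1
--   return X
-- ===== SOURCE B (Python) =====
-- from collections import Counter
-- from typing import List
--
-- def solve(lines: List[str]):
--   counts = Counter(lines)
--   inc = counts.get("X++", 0) + counts.get("X--", 0)
--   return 2 * inc - len(lines)
-- ===== Notes on version B (the rewrite author's own statement) =====
-- stated objective: alternative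
-- what changed: Replaces the running accumulator with a per-line branch by a Counter frequency table and the closed form 2*inc - len(lines).
import Mathlib
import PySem

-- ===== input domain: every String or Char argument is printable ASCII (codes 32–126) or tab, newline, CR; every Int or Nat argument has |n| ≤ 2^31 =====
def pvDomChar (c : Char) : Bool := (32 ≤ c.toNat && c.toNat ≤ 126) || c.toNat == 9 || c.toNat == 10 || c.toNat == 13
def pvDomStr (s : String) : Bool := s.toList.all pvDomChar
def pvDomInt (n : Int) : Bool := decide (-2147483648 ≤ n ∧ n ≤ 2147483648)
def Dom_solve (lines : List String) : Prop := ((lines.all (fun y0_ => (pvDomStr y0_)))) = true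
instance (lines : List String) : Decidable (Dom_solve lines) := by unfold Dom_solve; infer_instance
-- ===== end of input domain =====

-- ===== PORT A =====
-- A: running accumulator, +1 for "X++"/"X--", -1 otherwise
def solve (lines : List String) : Int :=
  lines.foldl (fun X line => if line == "X++" || line == "X--" then X + 1 else X - 1) 0

-- ===== PORT B =====
-- B: Counter frequency table, then closed form 2*inc - len(lines)
def solve_alt (lines : List String) : Int :=
  let counts := PySem.Dict.counter lines
  let inc := counts.getD "X++" 0 + counts.getD "X--" 0
  2 * inc - (lines.length : Int)

-- ===== PRECONDITION & SPEC =====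
def Spec_solve (lines : List String) (out : Int) : Prop := out = solve_alt lines
instance (lines : List String) (out : Int) : Decidable (Spec_solve lines out) := by unfold Spec_solve; infer_instance

-- ===== CLAIM (what is proved, stated in full; the proofs are below) =====
def Claim_equal_solve : Prop := ∀ (lines : List String), Dom_solve lines → Spec_solve lines (solve lines)

-- ===== LEMMAS AND PROOFS =====
lemma solve_foldl (lines : List String) (a : Int) :
    lines.foldl (fun X line => if line == "X++" || line == "X--" then X + 1 else X - 1) a
      = a + 2 * ((lines.count "X++" : Int) + (lines.count "X--" : Int)) - (lines.length : Int) := by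
  induction lines generalizing a with
  | nil => simp
  | cons h t ih =>
    simp only [List.foldl_cons, ih, List.count_cons, List.length_cons]
    by_cases h1 : h = "X++" <;> by_cases h2 : h = "X--" <;>
      simp [h1, h2] <;> ring

-- ===== VERDICT (by name: the statement is the Claim_ definition above) =====
theorem solve_spec : Claim_equal_solve := by
  intro lines _
  unfold Spec_solve solve solve_alt
  simp only [PySem.Dict.getD_counter, solve_foldl]
  ring
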